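-- pv_equiv track=rewrite | github.com/sherhacky/aoc22 | tetris.py | board_string
-- ===== SOURCE A (Python) =====
-- width = 10
--
-- height = 16
--
-- def board_string(tetromino, occupied_positions):
--     result = []
--     board = [['.' for j in range(width)] for i in range(height)]
--     for (i,j) in tetromino:
--         if 0 <= i < height and 0 <= j < width:
--             board[i][j] = '@'
--     for (i,j) in occupied_positions:
--         if 0 <= i < height and 0 <= j < width:
--             board[i][j] = '#'
--     for row in board[::-1]:
--         result.append(('|' + ''.join(row) + '|'))
--     result.append('+' + '-'*width + '+')
--     return tuple(result)
--
-- occupied_positions = set()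
-- ===== SOURCE B (Python) =====
-- width = 10
--
-- height = 16
--
-- def board_string(tetromino, occupied_positions):
--     occ = set(occupied_positions)
--     tet = set(tetromino)
--
--     def cell(i, j):
--         if (i, j) in occ:
--             return '#'
--         if (i, j) in tet:
--             return '@'
--         return '.'
--
--     rows = ['|' + ''.join(cell(i, j) for j in range(width)) + '|'
--             for i in range(height - 1, -1, -1)]
--     rows.append('+' + '-' * width + '+')
--     return tuple(rows)
-- ===== Notes on version B (the rewrite author's own statement) =====
-- stated objective: alternative
-- what changed: Instead of allocating a 16x10 grid and scattering '@'/'#' marks into it, B builds two sets once and renders each cell top-down by direct membership query (occupied before tetromino to keep the overwrite precedence), never materialising a mutable board.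
import Mathlib
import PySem

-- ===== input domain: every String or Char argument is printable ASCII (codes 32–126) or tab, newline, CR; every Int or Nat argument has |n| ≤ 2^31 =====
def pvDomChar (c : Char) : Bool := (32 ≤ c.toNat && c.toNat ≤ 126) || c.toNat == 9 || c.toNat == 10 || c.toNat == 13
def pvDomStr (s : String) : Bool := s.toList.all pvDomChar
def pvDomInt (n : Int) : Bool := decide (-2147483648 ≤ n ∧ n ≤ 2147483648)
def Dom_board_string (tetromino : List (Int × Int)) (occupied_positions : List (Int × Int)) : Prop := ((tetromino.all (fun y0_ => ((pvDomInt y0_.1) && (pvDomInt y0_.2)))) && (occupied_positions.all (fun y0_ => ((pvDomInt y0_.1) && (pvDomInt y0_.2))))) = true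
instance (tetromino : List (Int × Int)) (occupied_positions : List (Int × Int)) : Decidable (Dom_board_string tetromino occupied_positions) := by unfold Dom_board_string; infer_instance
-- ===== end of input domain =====

-- B renders each cell by direct set-membership queries instead of scattering marks into a
-- mutable 16x10 grid; same return value, no speed claim.

-- ===== PORT A =====
-- board[i][j] = c, guarded by Python's '0 <= i < height and 0 <= j < width'
-- (guard ensures the indices are nonnegative and in range, so .toNat/.set are exact here)
def pvMark (c : Char) (b : List (List Char)) (p : Int × Int) : List (List Char) :=
  if 0 ≤ p.1 ∧ p.1 < 16 ∧ 0 ≤ p.2 ∧ p.2 < 10 then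
    b.modify p.1.toNat (fun row => row.set p.2.toNat c)
  else b

def board_string (tetromino : List (Int × Int)) (occupied_positions : List (Int × Int)) : List String :=
  let board0 : List (List Char) := (List.range 16).map (fun _ => (List.range 10).map (fun _ => '.'))
  let board1 := tetromino.foldl (pvMark '@') board0
  let board2 := occupied_positions.foldl (pvMark '#') board1
  -- board[::-1] is board.reverse (PySem.List.slice?_none_none_neg_one)
  (board2.reverse.map (fun row => "|" ++ String.ofList row ++ "|"))
    ++ ["+" ++ String.ofList (List.replicate 10 '-') ++ "+"]

-- ===== PORT B =====
def pvCell (occ tet : PySem.Set (Int × Int)) (i j : Int) : Char :=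
  if (i, j) ∈ occ then '#' else if (i, j) ∈ tet then '@' else '.'

def board_string_alt (tetromino : List (Int × Int)) (occupied_positions : List (Int × Int)) : List String :=
  let occ : PySem.Set (Int × Int) := PySem.Set.ofList occupied_positions
  let tet : PySem.Set (Int × Int) := PySem.Set.ofList tetromino
  -- range(height-1, -1, -1) ported as (List.range 16).reverse
  ((List.range 16).reverse.map (fun (i : Nat) =>
      "|" ++ String.ofList ((List.range 10).map (fun (j : Nat) => pvCell occ tet (i : Int) (j : Int))) ++ "|"))
    ++ ["+" ++ String.ofList (List.replicate 10 '-') ++ "+"]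

-- ===== PRECONDITION & SPEC =====
def Spec_board_string (tetromino : List (Int × Int)) (occupied_positions : List (Int × Int)) (out : List String) : Prop := out = board_string_alt tetromino occupied_positions
instance (tetromino : List (Int × Int)) (occupied_positions : List (Int × Int)) (out : List String) : Decidable (Spec_board_string tetromino occupied_positions out) := by unfold Spec_board_string; infer_instance

-- ===== CLAIM (what is proved, stated in full; the proofs are below) =====
def Claim_equal_board_string : Prop := ∀ (tetromino : List (Int × Int)) (occupied_positions : List (Int × Int)), Dom_board_string tetromino occupied_positions → Spec_board_string tetromino occupied_positions (board_string tetromino occupied_positions)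

-- ===== LEMMAS AND PROOFS =====

/-- Cell lookup with '.'-defaults (only used at in-range indices of well-shaped grids). -/
def pvG2 (b : List (List Char)) (i j : Nat) : Char := (b.getD i []).getD j '.'

/-- Shape invariant of the board. -/
def pvInv (b : List (List Char)) : Prop := b.length = 16 ∧ ∀ r ∈ b, r.length = 10

theorem pvInv_mark (c : Char) (b : List (List Char)) (p : Int × Int) (h : pvInv b) :
    pvInv (pvMark c b p) := by
  obtain ⟨h1, h2⟩ := h
  unfold pvMark
  split
  · refine ⟨by simpa using h1, ?_⟩
    intro r hr
    obtain ⟨k, hk, hkr⟩ := List.mem_iff_getElem.1 hr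
    have hk' : k < b.length := by simpa using hk
    rw [List.getElem_modify] at hkr
    by_cases hki : p.1.toNat = k
    · rw [if_pos hki] at hkr
      rw [← hkr, List.length_set]
      exact h2 _ (List.getElem_mem hk')
    · rw [if_neg hki] at hkr
      rw [← hkr]
      exact h2 _ (List.getElem_mem hk')
  · exact ⟨h1, h2⟩

theorem pvG2_mark (c : Char) (b : List (List Char)) (p : Int × Int) (i j : Nat)
    (hb : pvInv b) (hi : i < 16) (hj : j < 10) :
    pvG2 (pvMark c b p) i j = if p = ((i : Int), (j : Int)) then c else pvG2 b i j := by
  obtain ⟨h1, h2⟩ := hb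
  unfold pvMark
  by_cases hg : 0 ≤ p.1 ∧ p.1 < 16 ∧ 0 ≤ p.2 ∧ p.2 < 10
  · rw [if_pos hg]
    have hib : i < b.length := by omega
    have hrow : (b.getD i []) = b[i] := List.getD_eq_getElem b [] hib
    by_cases hp : p = ((i : Int), (j : Int))
    · have hp1 : p.1.toNat = i := by rw [hp]; simp
      have hp2 : p.2.toNat = j := by rw [hp]; simp
      rw [if_pos hp]
      unfold pvG2
      have : (b.modify p.1.toNat (fun row => row.set p.2.toNat c)).getD i [] =
          b[i].set p.2.toNat c := by
        rw [List.getD_eq_getElem _ [] (by simpa using hib)]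
        simp [hp1]
      rw [this, hp2]
      have hjr : j < (b[i]).length := by
        have := h2 b[i] (List.getElem_mem hib); omega
      rw [List.getD_eq_getElem _ '.' (by simpa using hjr)]
      simp
    · rw [if_neg hp]
      unfold pvG2
      by_cases hpi : p.1.toNat = i
      · -- same row, different column (since p = (i, j) is excluded and p is in range)
        have hpj : p.2.toNat ≠ j := by
          intro hpj
          apply hp
          have : p.1 = (i : Int) := by omega
          have : p.2 = (j : Int) := by omega
          cases p; simp_all
        have : (b.modify p.1.toNat (fun row => row.set p.2.toNat c)).getD i [] =
            b[i].set p.2.toNat c := by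
          rw [List.getD_eq_getElem _ [] (by simpa using hib)]
          simp [hpi]
        rw [this, hrow]
        have hjr : j < (b[i]).length := by
          have := h2 b[i] (List.getElem_mem hib); omega
        rw [List.getD_eq_getElem _ '.' (by simpa using hjr),
            List.getD_eq_getElem _ '.' hjr]
        simp [hpj]
      · have : (b.modify p.1.toNat (fun row => row.set p.2.toNat c)).getD i [] =
            b.getD i [] := by
          rw [List.getD_eq_getElem _ [] (by simpa using hib), hrow]
          simp [hpi]
        rw [this]
  · rw [if_neg hg]
    have hp : p ≠ ((i : Int), (j : Int)) := by
      intro hp; apply hg; rw [hp]; constructor <;> [omega; constructor] <;>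
        [omega; constructor] <;> omega
    rw [if_neg hp]

theorem pvInv_foldl (c : Char) (ps : List (Int × Int)) (b : List (List Char)) (h : pvInv b) :
    pvInv (ps.foldl (pvMark c) b) := by
  induction ps generalizing b with
  | nil => exact h
  | cons p ps ih => exact ih _ (pvInv_mark c b p h)

theorem pvG2_foldl (c : Char) (ps : List (Int × Int)) (b : List (List Char)) (i j : Nat)
    (hb : pvInv b) (hi : i < 16) (hj : j < 10) :
    pvG2 (ps.foldl (pvMark c) b) i j =
      if ((i : Int), (j : Int)) ∈ ps then c else pvG2 b i j := by
  induction ps generalizing b with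
  | nil => simp
  | cons p ps ih =>
    rw [List.foldl_cons, ih _ (pvInv_mark c b p hb), pvG2_mark c b p i j hb hi hj]
    by_cases hm : ((i : Int), (j : Int)) ∈ ps
    · simp [hm]
    · by_cases hp : p = ((i : Int), (j : Int)) <;> simp [hm, hp, eq_comm]

theorem pvG2_board0 (i j : Nat) :
    pvG2 ((List.range 16).map (fun _ => (List.range 10).map (fun _ => '.'))) i j = '.' := by
  unfold pvG2
  rcases Nat.lt_or_ge i 16 with hi | hi
  · rw [List.getD_eq_getElem _ [] (by simpa using hi)]
    simp only [List.getElem_map]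
    rcases Nat.lt_or_ge j 10 with hj | hj
    · rw [List.getD_eq_getElem _ '.' (by simpa using hj)]
      simp only [List.getElem_map]
    · rw [List.getD_eq_default _ '.' (by simpa using hj)]
  · rw [List.getD_eq_default _ [] (by simpa using hi)]; simp

/-- The fully marked board is exactly the per-cell gather grid. -/
theorem pvBoard2_eq (tet occ : List (Int × Int)) :
    occ.foldl (pvMark '#') (tet.foldl (pvMark '@')
        ((List.range 16).map (fun _ => (List.range 10).map (fun _ => '.')))) =
      (List.range 16).map (fun (i : Nat) => (List.range 10).map (fun (j : Nat) =>
        if ((i : Int), (j : Int)) ∈ occ then '#'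
        else if ((i : Int), (j : Int)) ∈ tet then '@' else '.')) := by
  set b0 : List (List Char) := (List.range 16).map (fun _ => (List.range 10).map (fun _ => '.')) with hb0
  have hinv0 : pvInv b0 := by constructor <;> simp [hb0]
  have hinv1 := pvInv_foldl '@' tet b0 hinv0
  have hinv2 := pvInv_foldl '#' occ _ hinv1
  apply List.ext_getElem
  · simp [hinv2.1]
  · intro i hib hir
    have hi : i < 16 := by simpa [hinv2.1] using hib
    apply List.ext_getElem
    · have := hinv2.2 _ (List.getElem_mem hib)
      simp [this]
    · intro j hjb hjr
      have hj : j < 10 := by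
        have := hinv2.2 _ (List.getElem_mem hib); omega
      have hval : pvG2 (occ.foldl (pvMark '#') (tet.foldl (pvMark '@') b0)) i j =
          if ((i : Int), (j : Int)) ∈ occ then '#'
          else if ((i : Int), (j : Int)) ∈ tet then '@' else '.' := by
        rw [pvG2_foldl '#' occ _ i j hinv1 hi hj,
            pvG2_foldl '@' tet b0 i j hinv0 hi hj, pvG2_board0]
      have hget : pvG2 (occ.foldl (pvMark '#') (tet.foldl (pvMark '@') b0)) i j =
          (occ.foldl (pvMark '#') (tet.foldl (pvMark '@') b0))[i][j]'hjb := by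
        unfold pvG2
        rw [List.getD_eq_getElem _ [] hib, List.getD_eq_getElem _ '.' hjb]
      rw [← hget, hval]
      simp

-- ===== VERDICT (by name: the statement is the Claim_ definition above) =====
theorem board_string_spec : Claim_equal_board_string := by
  intro tet occ _
  unfold Spec_board_string
  simp only [board_string, board_string_alt]
  rw [pvBoard2_eq tet occ]
  rw [← List.map_reverse, List.map_map]
  congr 1
  apply List.map_congr_left
  intro i _
  simp only [Function.comp]
  congr 2
  congr 1
  apply List.map_congr_left
  intro j _
  simp [pvCell, PySem.Set.mem_ofList]
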